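-- pv_equiv track=rewrite | github.com/zhouhaosame/leetcode_zh | offer/20_表示数值的字符串.py | stringIsRepresentNumber
-- ===== SOURCE A (Python) =====
-- def stringIsRepresentNumber(chars):
--     if not chars or not str.strip(chars):
--         return False
--     chars=str.strip(chars)#去掉头尾的空白字符 “1    ”也是的，竟然
--     #chars.strip()#在python3中，strip函数是str的一个函数，与python2不一样了
--     chars_len = len(chars)
--     IsNumberToCur=0
--     def scan_unsignnumber(i):#
--         while(i<chars_len):
--             if ord("0")<=ord(chars[i])<=ord("9"):
--                 i+=1
--             else:
--                 return i
--         return i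
--     def scan_signnumber(i):
--         if i<chars_len and chars[i] in ["+","-"]:
--             i+=1
--         return scan_unsignnumber(i)
--     #开始匹配A,
--     i=0
--     cur_index=scan_signnumber(i)
--     IsNumberToCur=(cur_index>i and chars[i:cur_index] not in ["+","-"])
--     #这是IsNumberToCur==0标识A并不存在
--     if cur_index<chars_len and chars[cur_index]==".":
--         cur_index+=1
--         temp=cur_index
--         cur_index=scan_unsignnumber(temp)
--         IsNumberToCur=cur_index>temp or IsNumberToCur
--     if cur_index<chars_len and chars[cur_index] in ["e","E"]:
--         cur_index+=1
--         temp=cur_index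
--         cur_index=scan_signnumber(temp)
--         IsNumberToCur = cur_index > temp and chars[temp:cur_index] not in ["+", "-"] and IsNumberToCur
--     return IsNumberToCur and cur_index==chars_len
-- ===== SOURCE B (Python) =====
-- # B: split once at the first 'e'/'E' and validate mantissa / exponent parts directly,
-- # instead of A's index-scanning state machine. Objective: simpler decomposition.
-- def stringIsRepresentNumber(chars):
--     s = chars.strip()
--     if not s:
--         return False
--     i = 0
--     while i < len(s) and s[i] != "e" and s[i] != "E":
--         i += 1
--     if i == len(s):
--         return _pv_decimal(s)
--     return _pv_decimal(s[:i]) and _pv_integer(s[i + 1:])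
--
-- def _pv_unsigned(s):
--     return len(s) > 0 and all("0" <= c <= "9" for c in s)
--
-- def _pv_strip_sign(s):
--     if s and (s[0] == "+" or s[0] == "-"):
--         return s[1:]
--     return s
--
-- def _pv_integer(s):
--     return _pv_unsigned(_pv_strip_sign(s))
--
-- def _pv_decimal(s):
--     s = _pv_strip_sign(s)
--     if "." in s:
--         head, _, tail = s.partition(".")
--         if "." in tail:
--             return False
--         return (head == "" or _pv_unsigned(head)) and (tail == "" or _pv_unsigned(tail)) and (head != "" or tail != "")
--     return _pv_unsigned(s)
-- ===== Notes on version B (the rewrite author's own statement) =====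
-- stated objective: simpler
-- what changed: A's single-pass index-scanning validator (scan sign+digits, then optional dot+digits, then optional exponent, tracking a cursor and a validity flag) is replaced by splitting the string once at the first 'e'/'E' and validating the mantissa as an optionally-signed decimal (one split at the first dot) and the exponent as an optionally-signed integer.
import Mathlib
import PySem

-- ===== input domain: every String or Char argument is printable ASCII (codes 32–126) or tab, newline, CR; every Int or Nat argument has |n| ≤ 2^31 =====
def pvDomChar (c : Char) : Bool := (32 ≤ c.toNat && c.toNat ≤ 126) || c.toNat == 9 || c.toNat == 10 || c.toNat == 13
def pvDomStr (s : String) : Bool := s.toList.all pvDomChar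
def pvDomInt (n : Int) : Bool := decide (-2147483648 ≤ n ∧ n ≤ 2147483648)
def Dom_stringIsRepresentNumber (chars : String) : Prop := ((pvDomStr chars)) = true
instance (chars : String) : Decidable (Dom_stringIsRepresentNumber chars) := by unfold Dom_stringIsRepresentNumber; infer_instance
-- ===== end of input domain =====

-- B re-implements A's index-scanning validator by splitting once at the first 'e'/'E' and
-- validating mantissa/exponent parts directly (objective: simpler decomposition; same cost).

-- ===== PORT A =====
-- ord("0") <= ord(c) <= ord("9")
def pvDig (c : Char) : Bool := decide ('0'.toNat ≤ c.toNat) && decide (c.toNat ≤ '9'.toNat)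

-- the inner while loop of scan_unsignnumber (i only ever increases; Python i stays ≥ 0, so Nat)
def pvScanU (s : List Char) (i : Nat) : Nat :=
  if h : i < s.length then
    if pvDig s[i] then pvScanU s (i + 1) else i
  else i
termination_by s.length - i

-- scan_signnumber
def pvScanS (s : List Char) (i : Nat) : Nat :=
  if h : i < s.length then
    if s[i] = '+' ∨ s[i] = '-' then pvScanU s (i + 1) else pvScanU s i
  else pvScanU s i

-- the body of A after the strip (indices are Nats; the slices chars[a:b] have 0 ≤ a ≤ b ≤ len,
-- where Python's slice is exactly (s.drop a).take (b-a))
def pvACore (s : List Char) : Bool :=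
  let n := s.length
  let cur1 := pvScanS s 0
  let isNum1 := decide (0 < cur1) && !(decide ((s.drop 0).take (cur1 - 0) = ['+']) || decide ((s.drop 0).take (cur1 - 0) = ['-']))
  let p2 :=
    if cur1 < n ∧ s.getD cur1 ' ' = '.' then
      let temp := cur1 + 1
      let cur := pvScanU s temp
      (cur, decide (temp < cur) || isNum1)
    else (cur1, isNum1)
  let p3 :=
    if p2.1 < n ∧ (s.getD p2.1 ' ' = 'e' ∨ s.getD p2.1 ' ' = 'E') then
      let temp := p2.1 + 1
      let cur := pvScanS s temp
      (cur, decide (temp < cur) && !(decide ((s.drop temp).take (cur - temp) = ['+']) || decide ((s.drop temp).take (cur - temp) = ['-'])) && p2.2)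
    else p2
  p3.2 && decide (p3.1 = n)

def stringIsRepresentNumber (chars : String) : Bool :=
  -- "if not chars or not str.strip(chars): return False"
  if chars.toList = [] ∨ PySem.Chars.strip chars.toList = [] then false
  else pvACore (PySem.Chars.strip chars.toList)

-- ===== PORT B =====
def pvIsDig (c : Char) : Bool := decide ('0' ≤ c) && decide (c ≤ '9')

def pvUns (s : List Char) : Bool := !s.isEmpty && s.all pvIsDig

def pvStripSign (s : List Char) : List Char :=
  match s with
  | c :: t => if c = '+' ∨ c = '-' then t else c :: t
  | [] => []

def pvIntB (s : List Char) : Bool := pvUns (pvStripSign s)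

def pvDecB (s : List Char) : Bool :=
  let s' := pvStripSign s
  if '.' ∈ s' then
    -- s'.partition(".") : head = part before first '.', tl = part after it
    let hd := s'.takeWhile (fun c => !decide (c = '.'))
    let tl := (s'.dropWhile (fun c => !decide (c = '.'))).tail
    if '.' ∈ tl then false
    else (hd.isEmpty || pvUns hd) && (tl.isEmpty || pvUns tl) && (!hd.isEmpty || !tl.isEmpty)
  else pvUns s'

def pvBCore (s : List Char) : Bool :=
  if s.isEmpty then false
  else
    -- the while loop locating the first 'e'/'E' (span)
    let m := s.takeWhile (fun c => !decide (c = 'e') && !decide (c = 'E'))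
    let r := s.dropWhile (fun c => !decide (c = 'e') && !decide (c = 'E'))
    match r with
    | [] => pvDecB s
    | _ :: x => pvDecB m && pvIntB x

def stringIsRepresentNumber_alt (chars : String) : Bool :=
  pvBCore (PySem.Chars.strip chars.toList)

-- ===== PRECONDITION & SPEC =====
def Spec_stringIsRepresentNumber (chars : String) (out : Bool) : Prop := out = stringIsRepresentNumber_alt chars
instance (chars : String) (out : Bool) : Decidable (Spec_stringIsRepresentNumber chars out) := by unfold Spec_stringIsRepresentNumber; infer_instance

-- ===== CLAIM (what is proved, stated in full; the proofs are below) =====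
def Claim_equal_stringIsRepresentNumber : Prop := ∀ (chars : String), Dom_stringIsRepresentNumber chars → Spec_stringIsRepresentNumber chars (stringIsRepresentNumber chars)

-- ===== LEMMAS AND PROOFS =====

-- A's digit test equals B's
theorem pvDig_eq : pvDig = pvIsDig := by
  funext c; simp only [pvDig, pvIsDig]; congr 1

-- the characters consumed by scan_signnumber starting at the head of z
def pvConsumed (z : List Char) : List Char :=
  match z with
  | c :: t => if c = '+' ∨ c = '-' then c :: t.takeWhile pvIsDig else (c :: t).takeWhile pvIsDig
  | [] => []

-- what remains after scan_signnumber
def pvAfterS (z : List Char) : List Char := (pvStripSign z).dropWhile pvIsDig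

theorem pvConsumed_append (z : List Char) : pvConsumed z ++ pvAfterS z = z := by
  rcases z with _ | ⟨c, t⟩
  · rfl
  · by_cases hs : c = '+' ∨ c = '-' <;>
      simp [pvConsumed, pvAfterS, pvStripSign, hs, List.takeWhile_append_dropWhile]

theorem pvDropLenTW (p : Char → Bool) (z : List Char) :
    z.drop (z.takeWhile p).length = z.dropWhile p := by
  induction z with
  | nil => rfl
  | cons c t ih => by_cases hc : p c <;> simp [List.takeWhile_cons, List.dropWhile_cons, hc, ih]

theorem pvScanU_char (s : List Char) (i : Nat) :
    pvScanU s i = i + ((s.drop i).takeWhile pvIsDig).length := by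
  fun_induction pvScanU s i with
  | case1 i h hd ih =>
    rw [ih, List.drop_eq_getElem_cons h, List.takeWhile_cons, ← pvDig_eq, hd]
    simp; omega
  | case2 i h hd =>
    rw [List.drop_eq_getElem_cons h, List.takeWhile_cons, ← pvDig_eq]
    simp [hd]
  | case3 i h =>
    rw [List.drop_eq_nil_of_le (by omega)]
    simp

theorem pvScanS_char (s : List Char) (i : Nat) :
    pvScanS s i = i + (pvConsumed (s.drop i)).length := by
  by_cases h : i < s.length
  · have hd := List.drop_eq_getElem_cons h
    by_cases hs : s[i] = '+' ∨ s[i] = '-'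
    · rw [pvScanS, dif_pos h, if_pos hs, pvScanU_char, hd]
      simp [pvConsumed, hs]
      omega
    · rw [pvScanS, dif_pos h, if_neg hs, pvScanU_char, hd]
      simp [pvConsumed, hs]
  · rw [pvScanS, dif_neg h, pvScanU_char, List.drop_eq_nil_of_le (by omega)]
    simp [pvConsumed]

theorem pvDrop_len_consumed (z : List Char) :
    z.drop (pvConsumed z).length = pvAfterS z := by
  rcases z with _ | ⟨c, t⟩
  · rfl
  · by_cases hs : c = '+' ∨ c = '-' <;>
      simp [pvConsumed, pvAfterS, pvStripSign, hs, List.takeWhile_cons, pvDropLenTW]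
    · by_cases hc : pvIsDig c <;> simp [hc, List.dropWhile_cons, pvDropLenTW]

theorem pvTake_len_consumed (z : List Char) :
    z.take (pvConsumed z).length = pvConsumed z := by
  have hp : pvConsumed z <+: z := ⟨pvAfterS z, pvConsumed_append z⟩
  exact (List.prefix_iff_eq_take.mp hp).symm

theorem pvDrop_scanS (s : List Char) (i : Nat) :
    s.drop (pvScanS s i) = pvAfterS (s.drop i) := by
  rw [pvScanS_char, ← List.drop_drop, pvDrop_len_consumed]

theorem pvTake_scanS (s : List Char) (i : Nat) :
    (s.drop i).take (pvScanS s i - i) = pvConsumed (s.drop i) := by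
  rw [pvScanS_char, Nat.add_sub_cancel_left, pvTake_len_consumed]

theorem pvDrop_scanU (s : List Char) (i : Nat) :
    s.drop (pvScanU s i) = (s.drop i).dropWhile pvIsDig := by
  rw [pvScanU_char, ← List.drop_drop, pvDropLenTW]

-- A's "cur > i and slice not in [+,-]" test
theorem pvSignCheck (z : List Char) :
    (decide (0 < (pvConsumed z).length) &&
      !(decide (pvConsumed z = ['+']) || decide (pvConsumed z = ['-'])))
      = !((pvStripSign z).takeWhile pvIsDig).isEmpty := by
  rcases z with _ | ⟨c, t⟩
  · rfl
  · by_cases hs : c = '+' ∨ c = '-'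
    · rcases htw : t.takeWhile pvIsDig with _ | ⟨d, r⟩ <;>
        rcases hs with h | h <;> subst h <;> simp [pvConsumed, pvStripSign, htw]
    · by_cases hc : pvIsDig c
      · have hne : c ≠ '+' ∧ c ≠ '-' := by
          constructor <;> rintro rfl <;> revert hc <;> decide
        simp [pvConsumed, pvStripSign, hs, List.takeWhile_cons, hc, hne.1, hne.2]
      · simp [pvConsumed, pvStripSign, hs, List.takeWhile_cons, hc]

theorem pvUns_char (y : List Char) :
    pvUns y = (!(y.takeWhile pvIsDig).isEmpty && (y.dropWhile pvIsDig).isEmpty) := by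
  induction y with
  | nil => rfl
  | cons c t ih =>
    by_cases hc : pvIsDig c
    · simp only [pvUns, List.isEmpty_cons, List.all_cons, hc, List.takeWhile_cons,
        List.dropWhile_cons, if_pos rfl]
      rw [Bool.eq_iff_iff]
      simp [List.all_eq_true, List.dropWhile_eq_nil_iff, List.isEmpty_iff]
    · simp [pvUns, hc, List.takeWhile_cons, List.dropWhile_cons]

theorem pvGetD_drop (s : List Char) (i : Nat) (d : Char) :
    s.getD i d = (s.drop i).headD d := by
  induction s generalizing i with
  | nil => simp [List.getD]
  | cons c t ih =>
    cases i with
    | zero => simp [List.getD]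
    | succ j => simpa [List.getD] using ih j

-- normal form shared by both ports
def nfD1 (z : List Char) : List Char := (pvStripSign z).takeWhile pvIsDig

def nfR1 (z : List Char) : List Char := (pvStripSign z).dropWhile pvIsDig

def nfR2 (z : List Char) : List Char :=
  match nfR1 z with
  | c :: r => if c = '.' then r.dropWhile pvIsDig else c :: r
  | [] => []

def nfN2 (z : List Char) : Bool :=
  match nfR1 z with
  | c :: r => if c = '.' then (!(r.takeWhile pvIsDig).isEmpty || !(nfD1 z).isEmpty) else !(nfD1 z).isEmpty
  | [] => !(nfD1 z).isEmpty

def nfTail (z : List Char) : Bool :=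
  match z with
  | [] => true
  | c :: x => (decide (c = 'e') || decide (c = 'E')) && pvIntB x

def nfA (z : List Char) : Bool := nfN2 z && nfTail (nfR2 z)

theorem pvAfterS_eq_nfR1 (z : List Char) : pvAfterS z = nfR1 z := rfl

-- the exponent part of A (everything from the e/E test on), for any current index k and flag b
theorem pvEpart (s : List Char) (k : Nat) (b : Bool) (hk : k ≤ s.length) :
    ((if k < s.length ∧ (s.getD k ' ' = 'e' ∨ s.getD k ' ' = 'E') then
        (pvScanS s (k + 1),
          decide (k + 1 < pvScanS s (k + 1)) &&
            !(decide ((s.drop (k + 1)).take (pvScanS s (k + 1) - (k + 1)) = ['+']) ||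
              decide ((s.drop (k + 1)).take (pvScanS s (k + 1) - (k + 1)) = ['-'])) && b)
      else (k, b)).2 &&
     decide ((if k < s.length ∧ (s.getD k ' ' = 'e' ∨ s.getD k ' ' = 'E') then
        (pvScanS s (k + 1),
          decide (k + 1 < pvScanS s (k + 1)) &&
            !(decide ((s.drop (k + 1)).take (pvScanS s (k + 1) - (k + 1)) = ['+']) ||
              decide ((s.drop (k + 1)).take (pvScanS s (k + 1) - (k + 1)) = ['-'])) && b)
      else (k, b)).1 = s.length))
    = (b && nfTail (s.drop k)) := by
  rcases hdk : s.drop k with _ | ⟨c, x⟩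
  · have hk2 : s.length ≤ k := List.drop_eq_nil_iff.mp hdk
    have hkk : k = s.length := le_antisymm hk hk2
    rw [if_neg (show ¬(k < s.length ∧ (s.getD k ' ' = 'e' ∨ s.getD k ' ' = 'E')) from fun h => absurd h.1 (by omega))]
    simp [hkk, nfTail]
  · have hklt : k < s.length := by
      by_contra hh
      rw [List.drop_eq_nil_of_le (by omega)] at hdk
      simp at hdk
    have hgd : s.getD k ' ' = c := by rw [pvGetD_drop, hdk]; rfl
    have hdk1 : s.drop (k + 1) = x := by
      have h1 : s.drop (k + 1) = (s.drop k).drop 1 := by rw [List.drop_drop]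
      rw [h1, hdk]; rfl
    have hlx : x.length = s.length - (k + 1) := by rw [← hdk1, List.length_drop]
    have hconsle : (pvConsumed x).length ≤ x.length := by
      conv_rhs => rw [← pvConsumed_append x]
      simp
    by_cases hce : c = 'e' ∨ c = 'E'
    · rw [if_pos (show k < s.length ∧ (s.getD k ' ' = 'e' ∨ s.getD k ' ' = 'E') from ⟨hklt, by rw [hgd]; exact hce⟩)]
      dsimp only
      have hsc := pvScanS_char s (k + 1); rw [hdk1] at hsc
      have hds := pvDrop_scanS s (k + 1); rw [hdk1] at hds
      rw [hsc] at hds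
      rw [pvTake_scanS s (k + 1), hdk1, hsc, decide_eq_decide.mpr
        (show k + 1 < k + 1 + (pvConsumed x).length ↔ 0 < (pvConsumed x).length by omega)]
      rw [pvSignCheck x]
      have h2 : (k + 1 + (pvConsumed x).length = s.length) ↔ pvAfterS x = [] := by
        rw [← hds, List.drop_eq_nil_iff]
        omega
      rw [decide_eq_decide.mpr h2]
      rw [show decide (pvAfterS x = []) = (pvAfterS x).isEmpty by
        cases h : pvAfterS x <;> simp [h]]
      have hcb : (decide (c = 'e') || decide (c = 'E')) = true := by
        rcases hce with h | h <;> simp [h]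
      simp only [nfTail, hcb, Bool.true_and, pvIntB, pvUns_char, pvAfterS]
      cases (!((pvStripSign x).takeWhile pvIsDig).isEmpty) <;> cases b <;>
        cases (((pvStripSign x).dropWhile pvIsDig).isEmpty) <;> rfl
    · rw [if_neg (show ¬(k < s.length ∧ (s.getD k ' ' = 'e' ∨ s.getD k ' ' = 'E')) from fun h => hce (by rw [← hgd]; exact h.2))]
      dsimp only
      have h1 : decide (k = s.length) = false := by simp; omega
      have h2 : (decide (c = 'e') || decide (c = 'E')) = false := by
        push Not at hce
        simp [hce.1, hce.2]
      simp [h1, nfTail, h2]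

theorem pvA_nf (s : List Char) : pvACore s = nfA s := by
  simp only [pvACore, List.drop_zero, Nat.sub_zero]
  have hsc0 : pvScanS s 0 = (pvConsumed s).length := by
    simpa using pvScanS_char s 0
  rw [hsc0]
  have hds0 : s.drop (pvConsumed s).length = nfR1 s := by
    rw [pvDrop_len_consumed, pvAfterS_eq_nfR1]
  have hk0le : (pvConsumed s).length ≤ s.length := by
    conv_rhs => rw [← pvConsumed_append s]
    simp
  simp only [pvTake_len_consumed, pvSignCheck]
  rcases hR1 : nfR1 s with _ | ⟨c, r⟩
  · have hnil : s.drop (pvConsumed s).length = [] := by rw [hds0, hR1]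
    have hEq : (pvConsumed s).length = s.length := by
      have := List.drop_eq_nil_iff.mp hnil
      omega
    rw [if_neg (show ¬((pvConsumed s).length < s.length ∧ s.getD (pvConsumed s).length ' ' = '.') from fun h => absurd h.1 (by omega))]
    dsimp only
    rw [pvEpart s _ _ hk0le, hds0, hR1]
    simp [nfA, nfN2, nfR2, hR1, nfD1, nfTail]
  · have hne : s.drop (pvConsumed s).length ≠ [] := by rw [hds0, hR1]; simp
    have hlt : (pvConsumed s).length < s.length := by
      by_contra hh
      exact hne (List.drop_eq_nil_of_le (by omega))
    have hgd : s.getD (pvConsumed s).length ' ' = c := by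
      rw [pvGetD_drop, hds0, hR1]; rfl
    have hdt : s.drop ((pvConsumed s).length + 1) = r := by
      have h1 : s.drop ((pvConsumed s).length + 1) = (s.drop (pvConsumed s).length).drop 1 := by
        rw [List.drop_drop]
      rw [h1, hds0, hR1]; rfl
    by_cases hc : c = '.'
    · rw [if_pos (show (pvConsumed s).length < s.length ∧ s.getD (pvConsumed s).length ' ' = '.' from ⟨hlt, by rw [hgd, hc]⟩)]
      dsimp only
      have hsu : pvScanU s ((pvConsumed s).length + 1)
          = (pvConsumed s).length + 1 + (r.takeWhile pvIsDig).length := by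
        rw [pvScanU_char, hdt]
      have hdu : s.drop (pvScanU s ((pvConsumed s).length + 1)) = r.dropWhile pvIsDig := by
        rw [pvDrop_scanU, hdt]
      rw [hsu] at hdu
      rw [hsu, decide_eq_decide.mpr
        (show (pvConsumed s).length + 1 < (pvConsumed s).length + 1 + (r.takeWhile pvIsDig).length
          ↔ 0 < (r.takeWhile pvIsDig).length by omega)]
      rw [show decide (0 < (r.takeWhile pvIsDig).length) = !(r.takeWhile pvIsDig).isEmpty by
        cases h : r.takeWhile pvIsDig <;> simp [h]]
      have hklen : (pvConsumed s).length + 1 + (r.takeWhile pvIsDig).length ≤ s.length := by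
        have h1 : (r.takeWhile pvIsDig).length ≤ r.length := (List.takeWhile_prefix _).length_le
        have h2 : r.length = s.length - ((pvConsumed s).length + 1) := by
          rw [← hdt, List.length_drop]
        omega
      rw [pvEpart s _ _ hklen, hdu]
      simp [nfA, nfN2, nfR2, hR1, hc, nfD1]
    · rw [if_neg (show ¬((pvConsumed s).length < s.length ∧ s.getD (pvConsumed s).length ' ' = '.') from fun h => hc (by rw [← hgd]; exact h.2))]
      dsimp only
      rw [pvEpart s _ _ hk0le, hds0, hR1]
      simp [nfA, nfN2, nfR2, hR1, hc, nfD1]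

-- suffix facts, to know heads of leftovers are ordinary characters of z
theorem pvStripSign_suffix (z : List Char) : pvStripSign z <:+ z := by
  rcases z with _ | ⟨c, t⟩
  · exact List.suffix_rfl
  · by_cases hs : c = '+' ∨ c = '-' <;> simp [pvStripSign, hs]

theorem nfR1_suffix (z : List Char) : nfR1 z <:+ z :=
  (List.dropWhile_suffix _).trans (pvStripSign_suffix z)

theorem nfR2_suffix (z : List Char) : nfR2 z <:+ z := by
  have h := nfR1_suffix z
  rcases hR1 : nfR1 z with _ | ⟨c, r⟩ <;> rw [hR1] at h
  · simp only [nfR2, hR1]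
    exact List.nil_suffix
  · by_cases hc : c = '.'
    · simp only [nfR2, hR1]
      rw [if_pos hc]
      exact (List.dropWhile_suffix _).trans ((List.suffix_cons c r).trans h)
    · simp only [nfR2, hR1]
      rw [if_neg hc]
      exact h

-- B's decimal test in normal form
theorem pvDecB_nf (m : List Char) : pvDecB m = (nfN2 m && (nfR2 m).isEmpty) := by
  have hdotdig : pvIsDig '.' = false := by decide
  simp only [pvDecB, nfN2, nfR2, nfR1, nfD1]
  by_cases hm : '.' ∈ pvStripSign m
  · rw [if_pos hm]
    have hdne : (pvStripSign m).dropWhile (fun c => !decide (c = '.')) ≠ [] := by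
      intro h0
      rw [List.dropWhile_eq_nil_iff] at h0
      have := h0 '.' hm
      simp at this
    obtain ⟨tl, htl⟩ : ∃ tl, (pvStripSign m).dropWhile (fun c => !decide (c = '.')) = '.' :: tl := by
      rcases hdd : (pvStripSign m).dropWhile (fun c => !decide (c = '.')) with _ | ⟨d, tl⟩
      · exact absurd hdd hdne
      · refine ⟨tl, ?_⟩
        have hd0 : (!decide (d = '.')) = false := by
          have h6 := List.head_dropWhile_not (fun c => !decide (c = '.')) (l := pvStripSign m)
            (by rw [hdd]; simp)
          simpa [hdd] using h6
        simp at hd0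
        rw [hd0]
    have hht : pvStripSign m = ((pvStripSign m).takeWhile (fun c => !decide (c = '.'))) ++ '.' :: tl := by
      conv_lhs => rw [← List.takeWhile_append_dropWhile (p := fun c => !decide (c = '.')) (l := pvStripSign m)]
      rw [htl]
    have hhdfree : '.' ∉ (pvStripSign m).takeWhile (fun c => !decide (c = '.')) := by
      intro hcm
      have := List.mem_takeWhile_imp hcm
      simp at this
    rw [htl, List.tail_cons]
    generalize hhd : (pvStripSign m).takeWhile (fun c => !decide (c = '.')) = hd at hht hhdfree ⊢
    rw [hht, List.takeWhile_append, List.dropWhile_append]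
    by_cases h1 : (hd.takeWhile pvIsDig).length = hd.length
    · have h1' : hd.takeWhile pvIsDig = hd := (List.takeWhile_prefix _).eq_of_length h1
      have h1n : hd.dropWhile pvIsDig = [] :=
        List.dropWhile_eq_nil_iff.mpr (List.takeWhile_eq_self_iff.mp h1')
      rw [if_pos h1]
      by_cases h2 : tl.dropWhile pvIsDig = []
      · have halltl : ∀ c ∈ tl, pvIsDig c := List.dropWhile_eq_nil_iff.mp h2
        have hnod : '.' ∉ tl := fun hmem => by
          have h7 := halltl _ hmem
          rw [hdotdig] at h7
          exact Bool.noConfusion h7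
        have htw : tl.takeWhile pvIsDig = tl := List.takeWhile_eq_self_iff.mpr halltl
        rw [if_neg hnod, pvUns_char, pvUns_char, h1', htw, h1n, h2]
        simp only [List.takeWhile_cons, List.dropWhile_cons, hdotdig, Bool.false_eq_true,
          if_false, List.append_nil, List.isEmpty_nil]
        cases hde : hd.isEmpty <;> cases tle : tl.isEmpty <;> simp_all
      · rcases hdd2 : tl.dropWhile pvIsDig with _ | ⟨d, w⟩
        · exact absurd hdd2 h2
        have htlne : tl ≠ [] := fun h0 => by rw [h0] at hdd2; simp at hdd2
        have hUtl : pvUns tl = false := by rw [pvUns_char, hdd2]; simp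
        by_cases hdot2 : '.' ∈ tl
        · rw [if_pos (show ('.' ∈ tl) from hdot2), h1n]
          simp [List.dropWhile_cons, List.takeWhile_cons, hdotdig, hdd2]
        · have hte : tl.isEmpty = false := by simp [List.isEmpty_iff, htlne]
          rw [if_neg hdot2, h1n]
          simp [List.dropWhile_cons, List.takeWhile_cons, hdotdig, hdd2, hUtl, hte]
    · rcases hdd1 : hd.dropWhile pvIsDig with _ | ⟨d, w⟩
      · have ha : ∀ c ∈ hd, pvIsDig c := List.dropWhile_eq_nil_iff.mp hdd1
        have hb : hd.takeWhile pvIsDig = hd := List.takeWhile_eq_self_iff.mpr ha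
        exact absurd (by rw [hb]) h1
      · rw [if_neg h1]
        have hdmem : d ∈ hd := (List.dropWhile_suffix pvIsDig).subset (by rw [hdd1]; simp)
        have hdne' : d ≠ '.' := fun h0 => hhdfree (h0 ▸ hdmem)
        have hhdne : hd ≠ [] := by rintro rfl; simp at hdmem
        have hUhd : pvUns hd = false := by rw [pvUns_char, hdd1]; simp
        simp only [List.isEmpty_cons, Bool.false_eq_true, if_false, List.cons_append]
        by_cases hdot2 : '.' ∈ tl
        · rw [if_pos (show ('.' ∈ tl) from hdot2)]
          simp [hdne']
        · rw [if_neg hdot2]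
          simp [hdne', hUhd, hhdne]
  · rw [if_neg hm, pvUns_char]
    rcases hdd : (pvStripSign m).dropWhile pvIsDig with _ | ⟨d, r⟩
    · simp
    · have hdmem : d ∈ pvStripSign m := (List.dropWhile_suffix pvIsDig).subset (by rw [hdd]; simp)
      have hdne' : d ≠ '.' := fun h0 => hm (h0 ▸ hdmem)
      simp [hdne']

-- pushing the mantissa/exponent split through the normal form ('e'/'E' is no sign, digit or dot)
theorem nfStrip_append (mm x : List Char) (c : Char) (hc : c = 'e' ∨ c = 'E') :
    pvStripSign (mm ++ c :: x) = pvStripSign mm ++ c :: x := by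
  rcases mm with _ | ⟨d, t⟩
  · rcases hc with rfl | rfl <;> simp [pvStripSign]
  · by_cases hd : d = '+' ∨ d = '-' <;> simp [pvStripSign, hd]

theorem nfD1_append (mm x : List Char) (c : Char) (hc : c = 'e' ∨ c = 'E') :
    nfD1 (mm ++ c :: x) = nfD1 mm := by
  have hdig : pvIsDig c = false := by rcases hc with rfl | rfl <;> decide
  simp only [nfD1, nfStrip_append mm x c hc, List.takeWhile_append]
  split_ifs with h
  · rw [List.takeWhile_cons, hdig]
    simp [((List.takeWhile_prefix _).eq_of_length h)]
  · rfl

theorem nfR1_append (mm x : List Char) (c : Char) (hc : c = 'e' ∨ c = 'E') :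
    nfR1 (mm ++ c :: x) = nfR1 mm ++ c :: x := by
  have hdig : pvIsDig c = false := by rcases hc with rfl | rfl <;> decide
  simp only [nfR1, nfStrip_append mm x c hc, List.dropWhile_append]
  split_ifs with h
  · rw [List.dropWhile_cons, hdig]
    simp only [Bool.false_eq_true, if_false]
    simp [List.isEmpty_iff] at h
    rw [List.dropWhile_eq_nil_iff.mpr h]
    rfl
  · rfl

theorem nfR2_append (mm x : List Char) (c : Char) (hc : c = 'e' ∨ c = 'E') :
    nfR2 (mm ++ c :: x) = nfR2 mm ++ c :: x := by
  have hdig : pvIsDig c = false := by rcases hc with rfl | rfl <;> decide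
  have hdot : c ≠ '.' := by rcases hc with rfl | rfl <;> decide
  simp only [nfR2, nfR1_append mm x c hc]
  rcases hR1 : nfR1 mm with _ | ⟨d, y⟩
  · simp [hdot]
  · simp only [List.cons_append]
    by_cases hd : d = '.'
    · rw [if_pos hd, if_pos hd, List.dropWhile_append]
      split_ifs with h
      · rw [List.dropWhile_cons, hdig]
        simp only [Bool.false_eq_true, if_false]
        simp [List.isEmpty_iff] at h
        rw [List.dropWhile_eq_nil_iff.mpr h]
        rfl
      · rfl
    · rw [if_neg hd, if_neg hd]
      rfl

theorem nfN2_append (mm x : List Char) (c : Char) (hc : c = 'e' ∨ c = 'E') :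
    nfN2 (mm ++ c :: x) = nfN2 mm := by
  have hdig : pvIsDig c = false := by rcases hc with rfl | rfl <;> decide
  have hdot : c ≠ '.' := by rcases hc with rfl | rfl <;> decide
  simp only [nfN2, nfR1_append mm x c hc, nfD1_append mm x c hc]
  rcases hR1 : nfR1 mm with _ | ⟨d, y⟩
  · simp [hdot]
  · simp only [List.cons_append]
    by_cases hd : d = '.'
    · rw [if_pos hd, if_pos hd, List.takeWhile_append]
      split_ifs with h
      · rw [List.takeWhile_cons, hdig]
        simp [((List.takeWhile_prefix _).eq_of_length h)]
      · rfl
    · rw [if_neg hd, if_neg hd]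

theorem pvB_nf (s : List Char) : pvBCore s = nfA s := by
  rcases hs0 : s with _ | ⟨a, as⟩
  · decide
  · rw [← hs0]
    have hsne : s.isEmpty = false := by rw [hs0]; rfl
    simp only [pvBCore, hsne, Bool.false_eq_true, if_false]
    rcases hr : s.dropWhile (fun c => !decide (c = 'e') && !decide (c = 'E')) with _ | ⟨c, x⟩
    · dsimp only
      rw [pvDecB_nf]
      rcases hr2 : nfR2 s with _ | ⟨d, y⟩
      · simp [nfA, nfTail, hr2]
      · have hdmem : d ∈ s := (nfR2_suffix s).subset (by rw [hr2]; simp)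
        have hall := List.dropWhile_eq_nil_iff.mp hr
        have hde := hall d hdmem
        simp at hde
        simp [nfA, nfTail, hr2, hde.1, hde.2]
    · dsimp only
      have hsc : s = s.takeWhile (fun c => !decide (c = 'e') && !decide (c = 'E')) ++ c :: x := by
        conv_lhs => rw [← List.takeWhile_append_dropWhile
          (p := fun c => !decide (c = 'e') && !decide (c = 'E')) (l := s)]
        rw [hr]
      have hce : c = 'e' ∨ c = 'E' := by
        have h5 := List.head_dropWhile_not (fun c => !decide (c = 'e') && !decide (c = 'E'))
          (l := s) (by rw [hr]; simp)
        simp only [hr, List.head_cons] at h5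
        simp at h5
        by_cases h6 : c = 'e'
        · exact Or.inl h6
        · exact Or.inr (h5 h6)
      have hmmfree : ∀ d ∈ s.takeWhile (fun c => !decide (c = 'e') && !decide (c = 'E')),
          d ≠ 'e' ∧ d ≠ 'E' := by
        intro d hd
        have := List.mem_takeWhile_imp hd
        simp at this
        exact this
      conv_rhs => rw [hsc]
      rw [nfA, nfN2_append _ _ _ hce, nfR2_append _ _ _ hce, pvDecB_nf]
      rcases hr2 : nfR2 (s.takeWhile (fun c => !decide (c = 'e') && !decide (c = 'E'))) with _ | ⟨d, y⟩
      · have hcb : (decide (c = 'e') || decide (c = 'E')) = true := by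
          rcases hce with h | h <;> simp [h]
        simp [nfTail, hcb]
      · have hdmem : d ∈ s.takeWhile (fun c => !decide (c = 'e') && !decide (c = 'E')) :=
          (nfR2_suffix _).subset (by rw [hr2]; simp)
        have hde := hmmfree d hdmem
        simp [nfTail, hde.1, hde.2]

-- ===== VERDICT (by name: the statement is the Claim_ definition above) =====
theorem stringIsRepresentNumber_spec : Claim_equal_stringIsRepresentNumber := by
  intro chars _
  unfold Spec_stringIsRepresentNumber stringIsRepresentNumber stringIsRepresentNumber_alt
  by_cases h : PySem.Chars.strip chars.toList = []
  · simp [h, pvBCore]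
  · have hne : ¬(chars.toList = [] ∨ PySem.Chars.strip chars.toList = []) := by
      rintro (h1 | h2)
      · exact h (by rw [h1]; decide)
      · exact h h2
    simp only [if_neg hne, pvA_nf, pvB_nf]
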